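-- pv_equiv track=rewrite | github.com/ilambrev/freeCodeCamp-Daily-Challenges | Python_Solutions/2026_03/2026_03_17_anniversary_milestones.py | get_milestone
-- ===== SOURCE A (Python) =====
-- def get_milestone(years):
--     milestones = [
--         [1, "Paper"],
--         [5, "Wood"],
--         [10, "Tin"],
--         [25, "Silver"],
--         [40, "Ruby"],
--         [50, "Gold"],
--         [60, "Diamond"],
--         [70, "Platinum"]
--     ]
--
--     if years < milestones[0][0]:
--         return "Newlyweds"
--     else:
--         for years_married, milestone in milestones[::-1]:
--             if years >= years_married:
--                 return milestone
-- ===== SOURCE B (Python) =====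
-- def get_milestone(years):
--     thresholds = [1, 5, 10, 25, 40, 50, 60, 70]
--     names = ["Paper", "Wood", "Tin", "Silver", "Ruby", "Gold", "Diamond", "Platinum"]
--     # hand-written bisect_right: first index with thresholds[idx] > years
--     lo, hi = 0, len(thresholds)
--     while lo < hi:
--         mid = (lo + hi) // 2
--         if years < thresholds[mid]:
--             hi = mid
--         else:
--             lo = mid + 1
--     if lo == 0:
--         return "Newlyweds"
--     return names[lo - 1]
-- ===== Notes on version B (the rewrite author's own statement) =====
-- stated objective: alternative
-- what changed: Replaces the reverse linear scan over the milestone pairs with a binary search (hand-written bisect_right) over a sorted threshold list, indexing a parallel names list.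
import Mathlib
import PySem

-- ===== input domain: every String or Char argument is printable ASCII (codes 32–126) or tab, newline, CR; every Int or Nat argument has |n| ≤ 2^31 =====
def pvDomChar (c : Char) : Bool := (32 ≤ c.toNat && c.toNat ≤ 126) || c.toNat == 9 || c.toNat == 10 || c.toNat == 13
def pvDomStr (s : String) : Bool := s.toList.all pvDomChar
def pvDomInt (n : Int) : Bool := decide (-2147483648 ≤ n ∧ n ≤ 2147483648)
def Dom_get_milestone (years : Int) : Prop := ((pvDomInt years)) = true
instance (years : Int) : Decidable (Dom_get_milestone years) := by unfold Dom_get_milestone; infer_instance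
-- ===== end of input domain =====

-- B replaces A's reverse linear scan over the milestone pairs with a binary search (bisect_right) over a sorted threshold table; alternative structure, same result.

-- ===== PORT A =====
-- the for-loop over milestones[::-1]: returns the first name with years ≥ threshold;
-- the [] case is unreachable from get_milestone (the guard ensures years ≥ 1, which matches (1, "Paper"))
def pvScanA (years : Int) : List (Int × String) → String
  | [] => ""
  | (t, name) :: rest => if years ≥ t then name else pvScanA years rest

def pvMilestones : List (Int × String) :=
  [(1, "Paper"), (5, "Wood"), (10, "Tin"), (25, "Silver"),
   (40, "Ruby"), (50, "Gold"), (60, "Diamond"), (70, "Platinum")]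

def get_milestone (years : Int) : String :=
  if years < 1 then "Newlyweds"
  else pvScanA years pvMilestones.reverse

-- ===== PORT B =====
-- hand-written bisect_right loop from Source B: first index in [lo, hi) with x < xs[idx]
def pvBisect (xs : List Int) (x : Int) (lo hi : Nat) : Nat :=
  if lo < hi then
    let mid := (lo + hi) / 2
    if x < xs.getD mid 0 then pvBisect xs x lo mid
    else pvBisect xs x (mid + 1) hi
  else lo
termination_by hi - lo
decreasing_by all_goals omega

def pvThresholds : List Int := [1, 5, 10, 25, 40, 50, 60, 70]
def pvNames : List String := ["Paper", "Wood", "Tin", "Silver", "Ruby", "Gold", "Diamond", "Platinum"]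

def get_milestone_alt (years : Int) : String :=
  let lo := pvBisect pvThresholds years 0 pvThresholds.length
  if lo = 0 then "Newlyweds" else pvNames.getD (lo - 1) ""

-- ===== PRECONDITION & SPEC =====
def Spec_get_milestone (years : Int) (out : String) : Prop := out = get_milestone_alt years
instance (years : Int) (out : String) : Decidable (Spec_get_milestone years out) := by unfold Spec_get_milestone; infer_instance

-- ===== CLAIM (what is proved, stated in full; the proofs are below) =====
def Claim_equal_get_milestone : Prop := ∀ (years : Int), Dom_get_milestone years → Spec_get_milestone years (get_milestone years)

-- ===== LEMMAS AND PROOFS =====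
theorem pvBisect_base (xs : List Int) (y : Int) (l : Nat) : pvBisect xs y l l = l := by
  rw [pvBisect]; norm_num

theorem pvB_0_1 (y : Int) : pvBisect pvThresholds y 0 1 = (if y < 1 then (0:Nat) else (1:Nat)) := by
  rw [pvBisect]
  have hg : (pvThresholds[0]?).getD 0 = (1 : Int) := rfl
  norm_num [pvBisect_base, pvBisect_base]
  rw [hg]

theorem pvB_0_2 (y : Int) : pvBisect pvThresholds y 0 2 = (if y < 1 then (0:Nat) else (if y < 5 then (1:Nat) else (2:Nat))) := by
  rw [pvBisect]
  have hg : (pvThresholds[1]?).getD 0 = (5 : Int) := rfl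
  norm_num [pvB_0_1, pvBisect_base]
  rw [hg]
  try split_ifs <;> first | rfl | omega

theorem pvB_3_4 (y : Int) : pvBisect pvThresholds y 3 4 = (if y < 25 then (3:Nat) else (4:Nat)) := by
  rw [pvBisect]
  have hg : (pvThresholds[3]?).getD 0 = (25 : Int) := rfl
  norm_num [pvBisect_base, pvBisect_base]
  rw [hg]

theorem pvB_0_4 (y : Int) : pvBisect pvThresholds y 0 4 = (if y < 1 then (0:Nat) else (if y < 5 then (1:Nat) else (if y < 10 then (2:Nat) else (if y < 25 then (3:Nat) else (4:Nat))))) := by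
  rw [pvBisect]
  have hg : (pvThresholds[2]?).getD 0 = (10 : Int) := rfl
  norm_num [pvB_0_2, pvB_3_4]
  rw [hg]
  try split_ifs <;> first | rfl | omega

theorem pvB_5_6 (y : Int) : pvBisect pvThresholds y 5 6 = (if y < 50 then (5:Nat) else (6:Nat)) := by
  rw [pvBisect]
  have hg : (pvThresholds[5]?).getD 0 = (50 : Int) := rfl
  norm_num [pvBisect_base, pvBisect_base]
  rw [hg]

theorem pvB_7_8 (y : Int) : pvBisect pvThresholds y 7 8 = (if y < 70 then (7:Nat) else (8:Nat)) := by
  rw [pvBisect]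
  have hg : (pvThresholds[7]?).getD 0 = (70 : Int) := rfl
  norm_num [pvBisect_base, pvBisect_base]
  rw [hg]

theorem pvB_5_8 (y : Int) : pvBisect pvThresholds y 5 8 = (if y < 50 then (5:Nat) else (if y < 60 then (6:Nat) else (if y < 70 then (7:Nat) else (8:Nat)))) := by
  rw [pvBisect]
  have hg : (pvThresholds[6]?).getD 0 = (60 : Int) := rfl
  norm_num [pvB_5_6, pvB_7_8]
  rw [hg]
  try split_ifs <;> first | rfl | omega

theorem pvB_0_8 (y : Int) : pvBisect pvThresholds y 0 8 = (if y < 1 then (0:Nat) else (if y < 5 then (1:Nat) else (if y < 10 then (2:Nat) else (if y < 25 then (3:Nat) else (if y < 40 then (4:Nat) else (if y < 50 then (5:Nat) else (if y < 60 then (6:Nat) else (if y < 70 then (7:Nat) else (8:Nat))))))))) := by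
  rw [pvBisect]
  have hg : (pvThresholds[4]?).getD 0 = (40 : Int) := rfl
  norm_num [pvB_0_4, pvB_5_8]
  rw [hg]
  try split_ifs <;> first | rfl | omega

theorem pvA_chain (y : Int) : get_milestone y = (if y < 1 then "Newlyweds" else (if y ≥ 70 then "Platinum" else (if y ≥ 60 then "Diamond" else (if y ≥ 50 then "Gold" else (if y ≥ 40 then "Ruby" else (if y ≥ 25 then "Silver" else (if y ≥ 10 then "Tin" else (if y ≥ 5 then "Wood" else (if y ≥ 1 then "Paper" else ""))))))))) := by
  have hrev : pvMilestones.reverse =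
      [(70, "Platinum"), (60, "Diamond"), (50, "Gold"), (40, "Ruby"),
       (25, "Silver"), (10, "Tin"), (5, "Wood"), (1, "Paper")] := by rfl
  unfold get_milestone
  rw [hrev]
  simp only [pvScanA]

set_option maxHeartbeats 1000000 in
theorem get_milestone_spec : Claim_equal_get_milestone := by
  intro y _
  unfold Spec_get_milestone get_milestone_alt
  have hlen : pvThresholds.length = 8 := rfl
  rw [hlen, pvB_0_8, pvA_chain]
  simp only [pvNames]
  split_ifs <;> first | rfl | omega | decide | (exfalso; omega)
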